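-- pv_equiv track=rewrite | github.com/zadnan82/GiggliAgents | desktop-app/src-tauri/embedded/prefabs/rag_chain/rag_chain.py | _identify_document_intent
-- ===== SOURCE A (Python) =====
-- from typing import Dict, Any, List
--
-- def _identify_document_intent(
--     question: str, all_docs: List[str]
-- ) -> List[str]:
--     """
--     Smart document filtering based on question intent
--
--     Args:
--         question: User's question
--         all_docs: List of all document names
--
--     Returns:
--         List of relevant document names to search
--     """
--     question_lower = question.lower()
--
--     # Keywords that indicate specific document types
--     doc_type_keywords = {
--         "image": [".png", ".jpg", ".jpeg", ".gif", ".bmp"],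
--         "audio": [".wav", ".mp3", ".m4a", ".flac", ".ogg"],
--         "video": [".mp4", ".avi", ".mov", ".mkv"],
--         "spreadsheet": [".csv", ".xlsx", ".xls"],
--         "document": [".pdf", ".docx", ".doc", ".txt"],
--         "code": [".html", ".xml", ".json", ".py", ".js"],
--         "archive": [".zip", ".7z"],
--     }
--
--     # Check if question mentions specific file types
--     relevant_docs = []
--     mentioned_types = []
--
--     for doc_type, extensions in doc_type_keywords.items():
--         if doc_type in question_lower or any(
--             ext[1:] in question_lower for ext in extensions
--         ):
--             mentioned_types.append(doc_type)
--             # Add all docs of this type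
--             for doc in all_docs:
--                 if any(doc.lower().endswith(ext) for ext in extensions):
--                     relevant_docs.append(doc)
--
--     # Check if question mentions specific filenames
--     for doc in all_docs:
--         doc_name_parts = doc.lower().replace("_", " ").replace("-", " ").split(".")
--         for part in doc_name_parts[:-1]:  # Exclude extension
--             if len(part) > 3 and part in question_lower:
--                 if doc not in relevant_docs:
--                     relevant_docs.append(doc)
--
--     # If no specific docs identified, search all
--     if not relevant_docs:
--         return all_docs
--
--     return relevant_docs
-- ===== SOURCE B (Python) =====
-- from typing import List
--
--
-- def _identify_document_intent(
--     question: str, all_docs: List[str]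
-- ) -> List[str]:
--     question_lower = question.lower()
--
--     doc_type_keywords = {
--         "image": [".png", ".jpg", ".jpeg", ".gif", ".bmp"],
--         "audio": [".wav", ".mp3", ".m4a", ".flac", ".ogg"],
--         "video": [".mp4", ".avi", ".mov", ".mkv"],
--         "spreadsheet": [".csv", ".xlsx", ".xls"],
--         "document": [".pdf", ".docx", ".doc", ".txt"],
--         "code": [".html", ".xml", ".json", ".py", ".js"],
--         "archive": [".zip", ".7z"],
--     }
--
--     # Single pass over all_docs: pair every doc with each type whose
--     # extensions match it, then group into per-type buckets.
--     typed_pairs = [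
--         (doc_type, doc)
--         for doc in all_docs
--         for doc_type, extensions in doc_type_keywords.items()
--         if any(doc.lower().endswith(ext) for ext in extensions)
--     ]
--     buckets = {}
--     for doc_type, doc in typed_pairs:
--         buckets.setdefault(doc_type, []).append(doc)
--
--     # Types the question mentions, in keyword order.
--     mentioned_types = [
--         doc_type
--         for doc_type, extensions in doc_type_keywords.items()
--         if doc_type in question_lower
--         or any(ext[1:] in question_lower for ext in extensions)
--     ]
--
--     relevant_docs = []
--     for doc_type in mentioned_types:
--         relevant_docs.extend(buckets.get(doc_type, []))
--
--     # Docs whose (long enough) filename parts appear in the question.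
--     seen = set(relevant_docs)
--     for doc in all_docs:
--         if doc not in seen:
--             parts = doc.lower().replace("_", " ").replace("-", " ").split(".")
--             if any(len(p) > 3 and p in question_lower for p in parts[:-1]):
--                 relevant_docs.append(doc)
--                 seen.add(doc)
--
--     return relevant_docs if relevant_docs else all_docs
-- ===== Notes on version B (the rewrite author's own statement) =====
-- stated objective: alternative
-- what changed: Replaces A's per-mentioned-type rescans of all_docs by a single pass that classifies every doc into per-type buckets (a grouping dict), then concatenates the buckets of the mentioned types; the filename-part phase keeps a membership set instead of re-scanning the relevant list per part.
import Mathlib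
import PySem

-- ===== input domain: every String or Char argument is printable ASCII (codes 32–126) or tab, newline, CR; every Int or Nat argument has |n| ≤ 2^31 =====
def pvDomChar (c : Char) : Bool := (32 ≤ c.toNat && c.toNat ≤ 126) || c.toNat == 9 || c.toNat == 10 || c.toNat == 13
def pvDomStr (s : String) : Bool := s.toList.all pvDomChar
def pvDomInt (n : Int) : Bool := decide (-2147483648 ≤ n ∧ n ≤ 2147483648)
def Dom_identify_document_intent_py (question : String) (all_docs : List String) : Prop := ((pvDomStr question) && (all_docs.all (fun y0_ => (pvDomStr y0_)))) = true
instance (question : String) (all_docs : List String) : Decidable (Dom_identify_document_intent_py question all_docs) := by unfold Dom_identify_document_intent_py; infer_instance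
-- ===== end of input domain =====

-- B replaces A's per-mentioned-type rescans of all_docs by a single classifying pass into
-- per-type buckets plus a membership set in the filename-part phase (objective: alternative).

-- ===== PORT A =====
-- the literal doc_type_keywords dict of A, iterated in insertion order
def pvKw : List (String × List String) :=
  [("image", [".png", ".jpg", ".jpeg", ".gif", ".bmp"]),
   ("audio", [".wav", ".mp3", ".m4a", ".flac", ".ogg"]),
   ("video", [".mp4", ".avi", ".mov", ".mkv"]),
   ("spreadsheet", [".csv", ".xlsx", ".xls"]),
   ("document", [".pdf", ".docx", ".doc", ".txt"]),
   ("code", [".html", ".xml", ".json", ".py", ".js"]),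
   ("archive", [".zip", ".7z"])]

-- 'doc_type in question_lower or any(ext[1:] in question_lower for ext in extensions)'
def pvMentioned (ql : String) (te : String × List String) : Bool :=
  PySem.Str.isIn te.1 ql
    || te.2.any (fun ext => PySem.Str.isIn (PySem.Str.slice ext (some 1) none) ql)

-- 'any(doc.lower().endswith(ext) for ext in extensions)'
def pvDocMatch (doc : String) (exts : List String) : Bool :=
  exts.any (fun ext => PySem.Str.endswith (PySem.Str.lower doc) ext)

-- doc.lower().replace("_"," ").replace("-"," ").split(".") ; sep "." ≠ "" so split? is
-- always some and the getD default is never taken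
def pvParts (doc : String) : List String :=
  (PySem.Str.split?
     (PySem.Str.replace (PySem.Str.replace (PySem.Str.lower doc) "_" " ") "-" " ")
     ".").getD []

-- 'len(part) > 3 and part in question_lower'
def pvGood (ql : String) (part : String) : Bool :=
  decide (3 < PySem.Str.len part) && PySem.Str.isIn part ql

def identify_document_intent_py (question : String) (all_docs : List String) : List String :=
  let ql := PySem.Str.lower question
  -- first loop: state = (relevant_docs, mentioned_types)
  let st := pvKw.foldl (fun (st : List String × List String) te =>
    if pvMentioned ql te then
      (all_docs.foldl (fun acc doc => if pvDocMatch doc te.2 then acc ++ [doc] else acc) st.1,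
       st.2 ++ [te.1])
    else st) ([], [])
  -- second loop: filename parts (parts[:-1] excludes the extension)
  let rel := all_docs.foldl (fun rel doc =>
    (PySem.List.slice (pvParts doc) none (some (-1))).foldl (fun rel part =>
      if pvGood ql part then
        if rel.contains doc then rel else rel ++ [doc]
      else rel) rel) st.1
  if rel = [] then all_docs else rel

-- ===== PORT B =====
-- (shares the literal keyword table and the tiny per-expression helpers above)
def identify_document_intent_py_alt (question : String) (all_docs : List String) : List String :=
  let ql := PySem.Str.lower question
  -- single pass: (type, doc) pair for each type whose extensions match the doc
  let typed_pairs : List (String × String) :=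
    all_docs.flatMap (fun doc =>
      pvKw.filterMap (fun te =>
        if pvDocMatch doc te.2 then some (te.1, doc) else none))
  -- buckets.setdefault(t, []).append(doc)
  let buckets : PySem.Dict String (List String) :=
    typed_pairs.foldl (fun d p => d.modify p.1 [] (fun l => l ++ [p.2])) PySem.Dict.empty
  let mentioned : List String :=
    pvKw.filterMap (fun te => if pvMentioned ql te then some te.1 else none)
  let rel1 : List String :=
    mentioned.foldl (fun acc t => acc ++ buckets.getD t []) []
  -- filename-part pass with a membership set
  let st := all_docs.foldl (fun (st : List String × PySem.Set String) doc =>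
    if PySem.Set.contains st.2 doc then st
    else if (PySem.List.slice (pvParts doc) none (some (-1))).any (pvGood ql) then
      (st.1 ++ [doc], PySem.Set.add st.2 doc)
    else st) (rel1, PySem.Set.ofList rel1)
  if st.1 = [] then all_docs else st.1

-- ===== PRECONDITION & SPEC =====
def Spec_identify_document_intent_py (question : String) (all_docs : List String) (out : List String) : Prop := out = identify_document_intent_py_alt question all_docs
instance (question : String) (all_docs : List String) (out : List String) : Decidable (Spec_identify_document_intent_py question all_docs out) := by unfold Spec_identify_document_intent_py; infer_instance

-- ===== CLAIM (what is proved, stated in full; the proofs are below) =====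
def Claim_equal_identify_document_intent_py : Prop := ∀ (question : String) (all_docs : List String), Dom_identify_document_intent_py question all_docs → Spec_identify_document_intent_py question all_docs (identify_document_intent_py question all_docs)

-- ===== LEMMAS AND PROOFS =====

-- A's first loop: the pair state projects to a fold of the first component
theorem pv_fold_pair_fst (ql : String) (all_docs : List String) :
    ∀ (l : List (String × List String)) (a b : List String),
      (l.foldl (fun (st : List String × List String) te =>
        if pvMentioned ql te then
          (all_docs.foldl (fun acc doc => if pvDocMatch doc te.2 then acc ++ [doc] else acc) st.1,
           st.2 ++ [te.1])
        else st) (a, b)).1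
      = l.foldl (fun r te =>
          if pvMentioned ql te then r ++ all_docs.filter (fun doc => pvDocMatch doc te.2)
          else r) a := by
  intro l
  induction l with
  | nil => intro a b; rfl
  | cons te rest ih =>
      intro a b
      simp only [List.foldl_cons]
      by_cases h : pvMentioned ql te = true
      · simp only [h, if_pos, ih,
          PySem.List.foldl_append_if_eq_filter (fun doc => pvDocMatch doc te.2) all_docs a]
      · simp only [h, Bool.false_eq_true, if_false]
        exact ih a b

-- a guarded fold is a fold over the filtered list
theorem pv_foldl_if_filter {α β : Type} (p : α → Bool) (g : β → α → β) :
    ∀ (l : List α) (a : β),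
      l.foldl (fun r x => if p x then g r x else r) a = (l.filter p).foldl g a := by
  intro l
  induction l with
  | nil => intro a; rfl
  | cons x rest ih =>
      intro a
      by_cases h : p x = true
      · simp [h, ih]
      · simp [h, ih]

-- B's comprehension for mentioned_types
theorem pv_filterMap_if_some_fst {α : Type} (p : α → Bool) (k : α → String) :
    ∀ (l : List α),
      l.filterMap (fun x => if p x then some (k x) else none) = (l.filter p).map k := by
  intro l
  induction l with
  | nil => rfl
  | cons x rest ih =>
      by_cases h : p x = true
      · simp [h, ih]
      · simp [h, ih]

-- guarded singleton flatMap is filter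
theorem pv_flatMap_if_singleton {α : Type} (p : α → Bool) :
    ∀ (l : List α), (l.flatMap (fun x => if p x then [x] else [])) = l.filter p := by
  intro l
  induction l with
  | nil => rfl
  | cons x rest ih =>
      by_cases h : p x = true
      · simp [h, ih]
      · simp [h, ih]

-- no entry with key t: nothing survives the key filter
theorem pv_bucket_none (doc t : String) (q : String × List String → Bool) :
    ∀ (kw : List (String × List String)), t ∉ kw.map Prod.fst →
      ((kw.filterMap (fun te' => if q te' then some (te'.1, doc) else none)).filter
        (fun p => p.1 == t)) = [] := by
  intro kw
  induction kw with
  | nil => intro _; rfl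
  | cons hd rest ih =>
      intro hmem
      simp only [List.map_cons, List.mem_cons] at hmem
      push Not at hmem
      by_cases hq : q hd = true
      · simp only [List.filterMap_cons, hq, if_pos, List.filter_cons]
        rw [if_neg (by simpa using Ne.symm hmem.1)]
        exact ih hmem.2
      · simp only [List.filterMap_cons, hq, Bool.false_eq_true, if_false]
        exact ih hmem.2

-- the key filter over the per-doc pairs of a nodup-keyed kw list keeps exactly entry (t, e)
theorem pv_bucket_inner (doc t : String) (e : List String) (q : String × List String → Bool) :
    ∀ (kw : List (String × List String)), (kw.map Prod.fst).Nodup → (t, e) ∈ kw →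
      (((kw.filterMap (fun te' => if q te' then some (te'.1, doc) else none)).filter
        (fun p => p.1 == t)).map Prod.snd)
      = if q (t, e) then [doc] else [] := by
  intro kw
  induction kw with
  | nil => intro _ h; cases h
  | cons hd rest ih =>
      intro hnd hmem
      simp only [List.map_cons, List.nodup_cons] at hnd
      rcases List.mem_cons.1 hmem with heq | hrest
      · subst heq
        by_cases hq : q (t, e) = true
        · simp only [List.filterMap_cons, hq, if_pos, List.filter_cons]
          rw [if_pos (by simp)]
          rw [pv_bucket_none doc t q rest hnd.1]
          simp
        · simp only [List.filterMap_cons, hq, Bool.false_eq_true, if_false]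
          rw [pv_bucket_none doc t q rest hnd.1]
          simp [Bool.not_eq_true] at hq
          simp
      · have hne : hd.1 ≠ t := by
          intro hEq
          exact hnd.1 (hEq ▸ (List.mem_map.2 ⟨(t, e), hrest, rfl⟩))
        by_cases hq : q hd = true
        · simp only [List.filterMap_cons, hq, if_pos, List.filter_cons]
          rw [if_neg (by simpa using hne)]
          exact ih hnd.2 hrest
        · simp only [List.filterMap_cons, hq, Bool.false_eq_true, if_false]
          exact ih hnd.2 hrest

-- B's bucket of a keyword t is exactly A's inner rescan of all_docs for t's extensions
theorem pv_bucket_eq (all_docs : List String) (te : String × List String) (hte : te ∈ pvKw) :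
    ((all_docs.flatMap (fun doc =>
        pvKw.filterMap (fun te' =>
          if pvDocMatch doc te'.2 then some (te'.1, doc) else none))).foldl
      (fun d p => d.modify p.1 [] (fun l => l ++ [p.2])) PySem.Dict.empty).getD te.1 []
    = all_docs.filter (fun doc => pvDocMatch doc te.2) := by
  rw [PySem.Dict.getD_foldl_modify_append]
  rw [PySem.Dict.getD_empty, List.nil_append, List.filter_flatMap, List.map_flatMap]
  rw [show (fun doc => (((pvKw.filterMap (fun te' =>
        if pvDocMatch doc te'.2 then some (te'.1, doc) else none)).filter
          (fun p => p.1 == te.1)).map Prod.snd))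
      = (fun doc => if pvDocMatch doc te.2 then [doc] else []) from funext (fun doc =>
        pv_bucket_inner doc te.1 te.2 (fun te' => pvDocMatch doc te'.2) pvKw
          (by decide) (by simpa using hte))]
  exact pv_flatMap_if_singleton (fun doc => pvDocMatch doc te.2) all_docs

-- A's inner parts loop characterised
theorem pv_innerA_const (ql doc : String) :
    ∀ (parts : List String) (rel : List String), rel.contains doc = true →
      parts.foldl (fun rel part =>
        if pvGood ql part then
          if rel.contains doc then rel else rel ++ [doc]
        else rel) rel = rel := by
  intro parts
  induction parts with
  | nil => intro rel _; rfl
  | cons p ps ih =>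
      intro rel h
      simp only [List.foldl_cons, h, if_pos, ite_self]
      exact ih rel h

theorem pv_innerA (ql doc : String) :
    ∀ (parts : List String) (rel : List String),
      parts.foldl (fun rel part =>
        if pvGood ql part then
          if rel.contains doc then rel else rel ++ [doc]
        else rel) rel
      = if rel.contains doc = false ∧ parts.any (pvGood ql) then rel ++ [doc] else rel := by
  intro parts
  induction parts with
  | nil =>
      intro rel
      simp
  | cons p ps ih =>
      intro rel
      simp only [List.foldl_cons, List.any_cons]
      by_cases hg : pvGood ql p = true
      · by_cases hc : rel.contains doc = true
        · simp only [hg, if_pos, hc, if_pos]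
          rw [pv_innerA_const ql doc ps rel hc]
          simp
        · simp only [hg, if_pos]
          rw [if_neg hc]
          rw [pv_innerA_const ql doc ps (rel ++ [doc]) (by simp)]
          simp only [Bool.not_eq_true] at hc
          simp only [hc, Bool.true_or, and_true, if_pos trivial]
      · rw [if_neg hg, ih rel]
        simp [hg]

-- the second phase agrees, given a set with the same membership as the list
theorem pv_phase2 (ql : String) :
    ∀ (docs : List String) (r : List String) (s : PySem.Set String),
      (∀ x, x ∈ s ↔ x ∈ r) →
      docs.foldl (fun rel doc =>
        (PySem.List.slice (pvParts doc) none (some (-1))).foldl (fun rel part =>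
          if pvGood ql part then
            if rel.contains doc then rel else rel ++ [doc]
          else rel) rel) r
      = (docs.foldl (fun (st : List String × PySem.Set String) doc =>
          if PySem.Set.contains st.2 doc then st
          else if (PySem.List.slice (pvParts doc) none (some (-1))).any (pvGood ql) then
            (st.1 ++ [doc], PySem.Set.add st.2 doc)
          else st) (r, s)).1 := by
  intro docs
  induction docs with
  | nil => intro r s h; rfl
  | cons doc ds ih =>
      intro r s h
      simp only [List.foldl_cons]
      rw [pv_innerA ql doc]
      by_cases hc : doc ∈ r
      · rw [if_neg (by simp [hc])]
        rw [if_pos (by rw [PySem.Set.contains_iff]; exact (h doc).2 hc)]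
        exact ih r s h
      · by_cases ha : (PySem.List.slice (pvParts doc) none (some (-1))).any (pvGood ql) = true
        · rw [if_pos ⟨by simp [hc], ha⟩]
          rw [if_neg (by rw [PySem.Set.contains_iff]; exact fun hm => hc ((h doc).1 hm))]
          rw [if_pos ha]
          refine ih (r ++ [doc]) (s.add doc) ?_
          intro x
          rw [PySem.Set.mem_add]
          simp [h x]
        · rw [if_neg (by simp [ha])]
          rw [if_neg (by rw [PySem.Set.contains_iff]; exact fun hm => hc ((h doc).1 hm))]
          rw [if_neg (by simp [ha])]
          exact ih r s h

-- the two first phases produce the same relevant_docs list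
theorem pv_phase1 (ql : String) (all_docs : List String) :
    (pvKw.foldl (fun (st : List String × List String) te =>
      if pvMentioned ql te then
        (all_docs.foldl (fun acc doc => if pvDocMatch doc te.2 then acc ++ [doc] else acc) st.1,
         st.2 ++ [te.1])
      else st) ([], [])).1
    = (pvKw.filterMap (fun te => if pvMentioned ql te then some te.1 else none)).foldl
        (fun acc t =>
          acc ++ ((all_docs.flatMap (fun doc =>
              pvKw.filterMap (fun te' =>
                if pvDocMatch doc te'.2 then some (te'.1, doc) else none))).foldl
            (fun d p => d.modify p.1 [] (fun l => l ++ [p.2])) PySem.Dict.empty).getD t []) [] := by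
  rw [pv_fold_pair_fst ql all_docs pvKw [] []]
  rw [pv_filterMap_if_some_fst (fun te => pvMentioned ql te) Prod.fst pvKw]
  rw [List.foldl_map]
  rw [PySem.List.foldl_congr_mem (pvKw.filter (fun te => pvMentioned ql te))
        (fun (acc : List String) (te : String × List String) =>
          acc ++ ((all_docs.flatMap (fun doc =>
            pvKw.filterMap (fun te' =>
              if pvDocMatch doc te'.2 then some (te'.1, doc) else none))).foldl
          (fun (d : PySem.Dict String (List String)) p =>
            d.modify p.1 [] (fun l => l ++ [p.2])) PySem.Dict.empty).getD te.1 [])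
        (fun acc te => acc ++ all_docs.filter (fun doc => pvDocMatch doc te.2)) []
        (fun acc te hmem => by
          beta_reduce
          rw [pv_bucket_eq all_docs te (List.mem_of_mem_filter hmem)])]
  rw [← pv_foldl_if_filter (fun te => pvMentioned ql te)
        (fun r te => r ++ all_docs.filter (fun doc => pvDocMatch doc te.2)) pvKw []]

-- ===== VERDICT (by name: the statement is the Claim_ definition above) =====
theorem identify_document_intent_py_spec : Claim_equal_identify_document_intent_py := by
  intro question all_docs _
  unfold Spec_identify_document_intent_py identify_document_intent_py identify_document_intent_py_alt
  simp only []
  rw [pv_phase1, pv_phase2 _ _ _ _ (fun x => PySem.Set.mem_ofList _ x)]
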